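-- pv_equiv track=rewrite | github.com/jihye-woo/algorithm-practice | code-squad/week03/크레인-인형뽑기-게임.py | update_stack
-- ===== SOURCE A (Python) =====
-- def update_stack(stack):
--     num_of_pop = 0
--     while len(stack) > 1:
--         if stack[-1] == stack[-2]:
--             stack.pop()
--             stack.pop()
--             num_of_pop += 2
--         else: break
--     return num_of_pop
-- ===== SOURCE B (Python) =====
-- def update_stack(stack):
--     i = len(stack) - 1
--     count = 0
--     while i >= 1 and stack[i] == stack[i - 1]:
--         count += 2
--         i -= 2
--     del stack[len(stack) - count:]
--     return count
-- ===== Notes on version B (the rewrite author's own statement) =====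
-- stated objective: alternative
-- what changed: B replaces the pop-two-per-iteration mutating while loop by a read-only index scan that counts the matched pairs first and then removes them all with one bulk slice deletion.
import Mathlib
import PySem

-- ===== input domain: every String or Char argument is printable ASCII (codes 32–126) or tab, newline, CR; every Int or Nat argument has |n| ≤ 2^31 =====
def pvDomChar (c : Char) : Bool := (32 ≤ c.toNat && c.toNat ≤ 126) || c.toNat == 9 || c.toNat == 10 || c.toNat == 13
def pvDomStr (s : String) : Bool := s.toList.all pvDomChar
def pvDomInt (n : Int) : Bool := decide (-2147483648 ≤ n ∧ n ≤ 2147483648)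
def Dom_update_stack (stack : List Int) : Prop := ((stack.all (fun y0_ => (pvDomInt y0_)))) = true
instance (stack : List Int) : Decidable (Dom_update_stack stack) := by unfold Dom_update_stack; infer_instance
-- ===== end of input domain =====

-- B counts matched top pairs by an index scan and deletes them in one bulk slice; equivalence proved
-- is about the RETURN value (both Pythons also perform the same in-place mutation).

-- ===== PORT A =====
-- A's while loop: pop the top two while they are equal, counting pops.
def update_stack_loop (stack : List Int) (num_of_pop : Int) : Int :=
  if h : 1 < stack.length then
    if PySem.List.pyGet? stack (-1) = PySem.List.pyGet? stack (-2) then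
      -- stack.pop(); stack.pop()  ≡  drop the last two elements
      update_stack_loop (stack.take (stack.length - 2)) (num_of_pop + 2)
    else num_of_pop
  else num_of_pop
termination_by stack.length
decreasing_by simp [List.length_take]; omega

def update_stack (stack : List Int) : Int := update_stack_loop stack 0

-- ===== PORT B =====
-- B's index loop `while i >= 1 and stack[i] == stack[i-1]: count += 2; i -= 2` walks the list
-- from the top two elements at a time; on the reversed list that is this structural recursion.
def update_stack_altCount : List Int → Int
  | a :: b :: rest => if a = b then 2 + update_stack_altCount rest else 0
  | _ => 0

def update_stack_alt (stack : List Int) : Int := update_stack_altCount stack.reverse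

-- ===== PRECONDITION & SPEC =====
def Spec_update_stack (stack : List Int) (out : Int) : Prop := out = update_stack_alt stack
instance (stack : List Int) (out : Int) : Decidable (Spec_update_stack stack out) := by unfold Spec_update_stack; infer_instance

-- ===== CLAIM (what is proved, stated in full; the proofs are below) =====
def Claim_equal_update_stack : Prop := ∀ (stack : List Int), Dom_update_stack stack → Spec_update_stack stack (update_stack stack)

-- ===== LEMMAS AND PROOFS =====
lemma update_stack_loop_rev (l : List Int) (acc : Int) :
    update_stack_loop l.reverse acc = acc + update_stack_altCount l := by
  induction l using update_stack_altCount.induct generalizing acc with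
  | case1 b rest ih =>
      have hrev : (b :: b :: rest).reverse = rest.reverse ++ [b] ++ [b] := by simp
      have hlen : (rest.reverse ++ [b] ++ [b]).length = rest.length + 2 := by simp
      rw [hrev, update_stack_loop, dif_pos (by omega)]
      have h1 : PySem.List.pyGet? (rest.reverse ++ [b] ++ [b]) (-1) = some b := by
        simp [PySem.List.pyGet?_neg_one, List.getLast?_append]
      have h2 : PySem.List.pyGet? (rest.reverse ++ [b] ++ [b]) (-2) = some b := by
        rw [PySem.List.pyGet?_neg_ofNat _ 2 (by omega) (by simp)]
        simp
      rw [h1, h2, if_pos rfl]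
      have htake : (rest.reverse ++ [b] ++ [b]).take ((rest.reverse ++ [b] ++ [b]).length - 2)
          = rest.reverse := by
        rw [hlen]
        have : rest.length + 2 - 2 = rest.reverse.length := by simp
        rw [this, List.append_assoc, List.take_left]
      rw [htake, ih]
      simp [update_stack_altCount]
      ring
  | case2 a b rest hab =>
      have hrev : (a :: b :: rest).reverse = rest.reverse ++ [b] ++ [a] := by simp
      rw [hrev, update_stack_loop, dif_pos (by simp)]
      have h1 : PySem.List.pyGet? (rest.reverse ++ [b] ++ [a]) (-1) = some a := by
        simp [PySem.List.pyGet?_neg_one, List.getLast?_append]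
      have h2 : PySem.List.pyGet? (rest.reverse ++ [b] ++ [a]) (-2) = some b := by
        rw [PySem.List.pyGet?_neg_ofNat _ 2 (by omega) (by simp)]
        simp
      rw [h1, h2, if_neg (by simpa using hab)]
      simp [update_stack_altCount, hab]
  | case3 t h =>
      match t, h with
      | [], _ => simp [update_stack_loop, update_stack_altCount]
      | [a], _ => simp [update_stack_loop, update_stack_altCount]
      | a :: b :: rest, h => exact absurd rfl (h a b rest)

-- ===== VERDICT (by name: the statement is the Claim_ definition above) =====
theorem update_stack_spec : Claim_equal_update_stack := by
  intro stack _
  unfold Spec_update_stack update_stack update_stack_alt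
  have := update_stack_loop_rev stack.reverse 0
  simpa using this
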